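-- pv_equiv track=rewrite | github.com/akdl911215/algorithmTraining | python/algorithm/everything_algorithm/algorithm_study/test/test2.py | solution
-- ===== SOURCE A (Python) =====
-- def solution(S):
--     count = 0
--     freq = {}
--     for char in S:
--         if char in freq:
--             freq[char] += 1
--         else:
--             freq[char] = 1
--
--     for key, value in freq.items():
--         if value < 2:
--             return 0
--
--     for value in freq.values():
--         count += value // 2
--
--     return count
-- ===== SOURCE B (Python) =====
-- def solution(S):
--     total = 0
--     s = sorted(S)
--     n = len(s)
--     i = 0
--     while i < n:
--         j = i
--         while j < n and s[j] == s[i]: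
--             j += 1
--         run = j - i
--         if run < 2:
--             return 0
--         total += run // 2
--         i = j
--     return total
-- ===== Notes on version B (the rewrite author's own statement) =====
-- stated objective: alternative
-- what changed: Replaces A's dict-based frequency table and its three separate dict passes with a single run-length scan over the sorted characters, summing run//2 per run and returning 0 as soon as a run of length 1 is seen.
import Mathlib
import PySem

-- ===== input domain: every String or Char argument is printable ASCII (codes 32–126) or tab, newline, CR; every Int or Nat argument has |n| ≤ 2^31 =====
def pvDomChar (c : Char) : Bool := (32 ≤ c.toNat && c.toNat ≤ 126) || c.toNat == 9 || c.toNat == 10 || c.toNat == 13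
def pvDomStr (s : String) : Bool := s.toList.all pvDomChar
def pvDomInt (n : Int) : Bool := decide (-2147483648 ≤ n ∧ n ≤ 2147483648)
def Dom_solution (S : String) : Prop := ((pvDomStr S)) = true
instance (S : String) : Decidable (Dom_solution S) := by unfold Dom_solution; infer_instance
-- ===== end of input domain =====

-- B replaces A's hash-map frequency table and its three dict passes by a sort-then-run-length
-- scan over the sorted characters (objective: alternative decomposition, same return value).

-- ===== PORT A =====
def solution (S : String) : Int :=
  let freq := S.toList.foldl
    (fun d c => if d.contains c then d.modify c 0 (· + 1) else d.insert c 1)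
    PySem.Dict.empty
  if freq.items.any (fun kv => decide (kv.2 < 2)) then 0
  else freq.values.foldl (fun count v => count + PySem.Int.floordiv v 2) 0

-- ===== PORT B =====
-- the outer while-loop of Source B; `none` records that the loop body executed `return 0`
def runScan : List Char → Option Int
  | [] => some 0
  | c :: rest =>
      let same := rest.takeWhile (· == c)
      let rest' := rest.dropWhile (· == c)
      let run : Int := 1 + same.length
      if run < 2 then none
      else (runScan rest').map (fun t => PySem.Int.floordiv run 2 + t)
termination_by l => l.length
decreasing_by simpa using Nat.lt_succ_of_le (List.length_dropWhile_le _ _)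

def solution_alt (S : String) : Int :=
  match runScan (PySem.List.sorted S.toList (fun c => c) false) with
  | none => 0
  | some t => t

-- ===== PRECONDITION & SPEC =====
def Spec_solution (S : String) (out : Int) : Prop := out = solution_alt S
instance (S : String) (out : Int) : Decidable (Spec_solution S out) := by unfold Spec_solution; infer_instance

-- ===== CLAIM (what is proved, stated in full; the proofs are below) =====
def Claim_equal_solution : Prop := ∀ (S : String), Dom_solution S → Spec_solution S (solution S)

-- ===== LEMMAS AND PROOFS =====

-- The common value: 0 if some character occurs once, else the sum of count // 2 over distinct chars.
def aval (L : List Char) : Int :=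
  if ∃ c ∈ L, L.count c < 2 then 0
  else ((PySem.Set.ofList L).map (fun c => ((L.count c : Int)) / 2)).sum

lemma solution_eq_aval (S : String) : solution S = aval S.toList := by
  have hstep : (fun (d : PySem.Dict Char Int) (c : Char) =>
      if d.contains c then d.modify c 0 (· + 1) else d.insert c 1)
      = (fun d c => d.modify c 0 (· + 1)) := by
    funext d c
    by_cases h : d.contains c
    · simp [h]
    · simp only [Bool.not_eq_true] at h
      simp [h, PySem.Dict.modify, PySem.Dict.getD_of_not_contains (h := h)]
  have hfreq : S.toList.foldl
      (fun d c => if d.contains c then d.modify c 0 (· + 1) else d.insert c 1)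
      PySem.Dict.empty = PySem.Dict.counter S.toList := by
    rw [hstep, PySem.Dict.counter_eq_foldl]
  have hcond : (PySem.Dict.counter S.toList).items.any (fun kv => decide (kv.2 < 2))
      = decide (∃ c ∈ S.toList, S.toList.count c < 2) := by
    rw [PySem.Dict.items_counter, List.any_map]
    rcases Bool.eq_false_or_eq_true (decide (∃ c ∈ S.toList, S.toList.count c < 2)) with h | h
    swap
    · rw [h]
      rw [decide_eq_false_iff_not] at h
      push_neg at h
      apply List.any_eq_false.2
      intro k hk
      simp only [Function.comp, decide_eq_true_eq, not_lt]
      exact_mod_cast h k (by rwa [PySem.Set.mem_ofList] at hk)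
    · rw [h]
      rw [decide_eq_true_eq] at h
      obtain ⟨c, hc, h2⟩ := h
      apply List.any_eq_true.2
      refine ⟨c, (PySem.Set.mem_ofList _ _).2 hc, ?_⟩
      simp only [Function.comp, decide_eq_true_eq]
      exact_mod_cast h2
  rw [solution]
  simp only [hfreq, hcond]
  rw [aval]
  by_cases hex : ∃ c ∈ S.toList, S.toList.count c < 2
  · rw [if_pos (decide_eq_true hex), if_pos hex]
  · rw [if_neg (by simpa using hex), if_neg hex]
    have hv : (PySem.Dict.counter S.toList).values
        = (PySem.Set.ofList S.toList).map (fun k => ((S.toList.count k : Int))) := by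
      have := PySem.Dict.items_counter (κ := Char) S.toList
      simp only [PySem.Dict.values, this, List.map_map]
      rfl
    rw [hv, PySem.List.foldl_add, List.map_map]
    simp only [zero_add]
    congr 1
    apply List.map_congr_left
    intro c hc
    simp only [Function.comp]
    rw [PySem.Int.floordiv_eq_ediv_of_pos (by norm_num : (0:Int) < 2)]

lemma runScan_spec_aux : ∀ (n : Nat) (l : List Char), l.length ≤ n → l.Pairwise (· ≤ ·) →
    runScan l = if ∃ c ∈ l, l.count c < 2 then none
      else some (((PySem.Set.ofList l).map (fun c => ((l.count c : Int)) / 2)).sum) := by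
  intro n
  induction n with
  | zero =>
    intro l hl _
    have : l = [] := List.eq_nil_of_length_eq_zero (Nat.le_zero.1 hl)
    subst this
    simp [runScan, PySem.Set.ofList]
  | succ n IH =>
    intro l hl hp
    match l with
    | [] => simp [runScan, PySem.Set.ofList]
    | c :: rest =>
      set same := rest.takeWhile (· == c) with hsame_def
      set rest' := rest.dropWhile (· == c) with hrest'_def
      have hcle : ∀ x ∈ rest, c ≤ x := (List.pairwise_cons.1 hp).1
      have hrp : rest.Pairwise (· ≤ ·) := (List.pairwise_cons.1 hp).2
      have hr'p : rest'.Pairwise (· ≤ ·) := hrp.sublist (List.dropWhile_sublist _)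
      have hsplit : same ++ rest' = rest := List.takeWhile_append_dropWhile
      have hsame : ∀ x ∈ same, x = c := fun x hx => by
        have := List.mem_takeWhile_imp hx; exact eq_of_beq this
      have hne : ∀ x ∈ rest', x ≠ c := by
        intro x hx
        match hr : rest' with
        | [] => exact absurd hx (by simp)
        | d :: t =>
          have hdnotc : (d == c) = false := by
            have := List.head?_dropWhile_not (· == c) rest
            rw [← hrest'_def] at this
            simpa using this
          have hsub : (d :: t).Sublist rest := hrest'_def ▸ List.dropWhile_sublist (· == c)
          have hdmem : d ∈ rest := hsub.mem List.mem_cons_self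
          have hcd : c < d := lt_of_le_of_ne (hcle d hdmem) (fun h => by subst h; simp at hdnotc)
          have hr'p2 : (d :: t).Pairwise (fun a b => a ≤ b) := hrest'_def ▸ hr'p
          rcases List.mem_cons.1 hx with h | h
          · subst h; exact ne_of_gt hcd
          · have : d ≤ x := (List.pairwise_cons.1 hr'p2).1 x h
            exact ne_of_gt (lt_of_lt_of_le hcd this)
      have hcnotr' : c ∉ rest' := fun h => hne c h rfl
      have hcount_c : (c :: rest).count c = 1 + same.length := by
        rw [List.count_cons_self, ← hsplit, List.count_append,
          List.count_eq_length.2 (fun b hb => (hsame b hb).symm),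
          List.count_eq_zero.2 hcnotr']
        omega
      have hcount_ne : ∀ x, x ≠ c → (c :: rest).count x = rest'.count x := by
        intro x hx
        rw [List.count_cons_of_ne (by simpa using Ne.symm hx), ← hsplit, List.count_append,
          List.count_eq_zero.2 (fun hmem => hx (hsame x hmem)), Nat.zero_add]
      have hmem : ∀ x, x ∈ (c :: rest) ↔ x = c ∨ x ∈ rest' := by
        intro x
        constructor
        · intro h
          rcases List.mem_cons.1 h with h | h
          · exact Or.inl h
          · rw [← hsplit] at h
            rcases List.mem_append.1 h with h | h
            · exact Or.inl (hsame x h)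
            · exact Or.inr h
        · rintro (h | h)
          · exact h ▸ List.mem_cons_self
          · exact List.mem_cons_of_mem _ ((List.dropWhile_sublist _).mem h)
      have hperm : (PySem.Set.ofList (c :: rest)).Perm (c :: PySem.Set.ofList rest') := by
        rw [List.perm_ext_iff_of_nodup (PySem.Set.nodup_ofList _)
          (by exact List.nodup_cons.2 ⟨fun h => hcnotr' ((PySem.Set.mem_ofList _ _).1 h), PySem.Set.nodup_ofList _⟩)]
        intro a
        rw [PySem.Set.mem_ofList, hmem a, List.mem_cons, PySem.Set.mem_ofList]
      rw [runScan]
      by_cases hrun : (1 + (same.length : Int)) < 2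
      · have hsl : same.length = 0 := by omega
        rw [if_pos (by exact_mod_cast hrun), if_pos ⟨c, List.mem_cons_self, by omega⟩]
      · rw [if_neg (by exact_mod_cast hrun)]
        have hr'len : rest'.length ≤ n := by
          rw [hrest'_def]
          have h1 := List.length_dropWhile_le (· == c) rest
          simp at hl
          omega
        rw [IH rest' hr'len hr'p]
        by_cases hex : ∃ x ∈ rest', rest'.count x < 2
        · obtain ⟨x, hx, hcnt⟩ := hex
          rw [if_pos ⟨x, hx, hcnt⟩,
            if_pos ⟨x, List.mem_cons_of_mem _ ((List.dropWhile_sublist _).mem hx), by rwa [hcount_ne x (hne x hx)]⟩]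
          rfl
        · rw [if_neg hex]
          push_neg at hex
          rw [if_neg ?_]
          swap
          · rintro ⟨x, hx, hcnt⟩
            rcases (hmem x).1 hx with h | h
            · subst h; omega
            · rw [hcount_ne x (hne x h)] at hcnt
              exact absurd hcnt (by have := hex x h; omega)
          · simp only [Option.map_some]
            congr 1
            rw [((hperm.map _).sum_eq : _)]
            rw [List.map_cons, List.sum_cons]
            congr 1
            · rw [hcount_c, PySem.Int.floordiv_eq_ediv_of_pos (by norm_num : (0:Int) < 2)]
              push_cast
              rw [hsame_def]
            · congr 1
              apply List.map_congr_left
              intro x hx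
              rw [hcount_ne x (hne x ((PySem.Set.mem_ofList _ _).1 hx))]

lemma aval_sorted (L : List Char) :
    aval (PySem.List.sorted L (fun c => c) false) = aval L := by
  have hP : (PySem.List.sorted L (fun c => c) false).Perm L := PySem.List.sorted_perm L _ _
  rw [aval, aval]
  have hcond : (∃ c ∈ PySem.List.sorted L (fun c => c) false,
      (PySem.List.sorted L (fun c => c) false).count c < 2) ↔ (∃ c ∈ L, L.count c < 2) := by
    constructor
    · rintro ⟨c, hc, h2⟩; exact ⟨c, hP.mem_iff.1 hc, by rwa [hP.count_eq] at h2⟩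
    · rintro ⟨c, hc, h2⟩; exact ⟨c, hP.mem_iff.2 hc, by rwa [hP.count_eq]⟩
  by_cases h : ∃ c ∈ L, L.count c < 2
  · rw [if_pos (hcond.2 h), if_pos h]
  · rw [if_neg (fun hh => h (hcond.1 hh)), if_neg h]
    have hop : (PySem.Set.ofList (PySem.List.sorted L (fun c => c) false)).Perm
        (PySem.Set.ofList L) := by
      rw [List.perm_ext_iff_of_nodup (PySem.Set.nodup_ofList _) (PySem.Set.nodup_ofList _)]
      intro a
      rw [PySem.Set.mem_ofList, PySem.Set.mem_ofList, hP.mem_iff]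
    rw [List.map_congr_left (fun c _ => by rw [hP.count_eq c])]
    exact (hop.map (fun c => ((L.count c : Int)) / 2)).sum_eq

lemma alt_eq_aval (S : String) : solution_alt S = aval S.toList := by
  rw [solution_alt,
    runScan_spec_aux (PySem.List.sorted S.toList (fun c => c) false).length _
      (le_refl _) (PySem.List.sorted_pairwise S.toList (fun c => c)),
    ← aval_sorted S.toList, aval]
  split_ifs with h <;> simp

-- ===== VERDICT (by name: the statement is the Claim_ definition above) =====
theorem solution_spec : Claim_equal_solution := by
  intro S _
  unfold Spec_solution
  rw [solution_eq_aval, alt_eq_aval]
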